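-- pv_equiv track=rewrite | github.com/dartl0l/spiking-learn | patterns.py | predict_from_latency
-- ===== SOURCE A (Python) =====
-- import operator
--
-- def predict_from_latency(latency_list):
--     output_list = []
--     for latency in latency_list:
--         tmp_list = [latency[neuron][:1]
--                     for neuron in sorted(latency.keys())]
--         min_index, min_value = min(enumerate(tmp_list),
--                                    key=operator.itemgetter(1))
--         output_list.append(min_index)
--     return output_list
-- ===== SOURCE B (Python) =====
-- import operator
--
--
-- def _best_neuron(latency):
--     pairs = [(latency[k][:1], i) for i, k in enumerate(sorted(latency))]
--     return sorted(pairs, key=operator.itemgetter(0))[0][1]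
--
--
-- def predict_from_latency(latency_list):
--     return [_best_neuron(latency) for latency in latency_list]
-- ===== Notes on version B (the rewrite author's own statement) =====
-- stated objective: alternative
-- what changed: Replaces the min-over-enumerate linear scan with a sort-then-pick-first strategy: each dict is turned into (first-spike, position) pairs, stably sorted by the spike value alone, and the position of the head is taken; the outer accumulator loop becomes a comprehension over a helper.
import Mathlib
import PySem

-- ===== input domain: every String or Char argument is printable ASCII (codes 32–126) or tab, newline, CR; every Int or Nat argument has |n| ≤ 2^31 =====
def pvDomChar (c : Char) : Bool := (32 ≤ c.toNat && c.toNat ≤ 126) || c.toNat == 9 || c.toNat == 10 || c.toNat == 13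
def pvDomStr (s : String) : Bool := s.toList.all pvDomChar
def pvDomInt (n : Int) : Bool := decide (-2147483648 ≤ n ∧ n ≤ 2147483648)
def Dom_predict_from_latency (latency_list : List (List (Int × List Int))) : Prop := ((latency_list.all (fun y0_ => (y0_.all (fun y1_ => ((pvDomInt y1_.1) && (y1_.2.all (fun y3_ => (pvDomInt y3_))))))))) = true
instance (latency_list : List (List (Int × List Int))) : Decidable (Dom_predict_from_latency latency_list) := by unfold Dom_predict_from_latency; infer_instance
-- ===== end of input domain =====

-- B re-decomposes A's per-dict min-scan as sort-the-(value,position)-pairs-and-take-the-head; alternative, not faster.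

-- ===== PORT A =====
-- A: accumulator loop; per dict, tmp_list of first-spike slices over sorted keys, then
-- min(enumerate(tmp_list), key=itemgetter(1)); min raises ValueError on an empty dict (excluded by Pre_).
def predict_from_latency (latency_list : List (List (Int × List Int))) : List Int :=
  latency_list.foldl (fun output_list latency =>
    let d := PySem.Dict.ofList latency
    let tmp_list := (PySem.List.sorted d.keys (fun k => k) false).map
      (fun neuron => PySem.List.slice (d.getD neuron []) none (some 1))
    match PySem.List.min? (PySem.List.enumerate tmp_list 0) (fun p => p.2) with
    | some m => output_list ++ [m.1]
    | none => output_list  -- unreachable: Python's min raises here; Pre_ excludes empty dicts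
  ) []

-- ===== PORT B =====
-- B helper: (value, position) pairs over sorted keys, stable-sorted by value alone; head's position.
def pvBestNeuron (latency : List (Int × List Int)) : Int :=
  let d := PySem.Dict.ofList latency
  let pairs := (PySem.List.enumerate (PySem.List.sorted d.keys (fun k => k) false) 0).map
    (fun p => (PySem.List.slice (d.getD p.2 []) none (some 1), p.1))
  match PySem.List.pyGet? (PySem.List.sorted pairs (fun q => q.1) false) 0 with
  | some q => q.2
  | none => 0  -- unreachable: Python's [0] raises IndexError here; Pre_ excludes empty dicts

def predict_from_latency_alt (latency_list : List (List (Int × List Int))) : List Int :=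
  latency_list.map pvBestNeuron

-- ===== PRECONDITION & SPEC =====
-- Pre_ excludes lists containing an empty dict: A's min (and B's [0]) raises there.
def Pre_predict_from_latency (latency_list : List (List (Int × List Int))) : Prop :=
  ∀ latency ∈ latency_list, latency ≠ []
instance (latency_list : List (List (Int × List Int))) : Decidable (Pre_predict_from_latency latency_list) := by unfold Pre_predict_from_latency; infer_instance
def pvWitness_predict_from_latency : (List (List (Int × List Int))) := [[(1, [5]), (2, [3])], [(0, []), (1, [2])]]

def Spec_predict_from_latency (latency_list : List (List (Int × List Int))) (out : List Int) : Prop := out = predict_from_latency_alt latency_list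
instance (latency_list : List (List (Int × List Int))) (out : List Int) : Decidable (Spec_predict_from_latency latency_list out) := by unfold Spec_predict_from_latency; infer_instance

-- ===== CLAIM (what is proved, stated in full; the proofs are below) =====
def Claim_equal_predict_from_latency : Prop := ∀ (latency_list : List (List (Int × List Int))), Dom_predict_from_latency latency_list → Pre_predict_from_latency latency_list → Spec_predict_from_latency latency_list (predict_from_latency latency_list)

-- ===== LEMMAS AND PROOFS =====

-- head of insertBy (with a strict-< 'before') is the min?-step applied to the old head
theorem pv_head?_insertBy {α κ : Type} [LT κ] [DecidableLT κ] (key : α → κ) (x : α) (l : List α) :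
    (PySem.List.insertBy (fun a b => decide (key a < key b)) x l).head? =
      match l.head? with
      | none => some x
      | some m => if key x < key m then some x else some m := by
  cases l with
  | nil => simp [PySem.List.insertBy]
  | cons m t =>
      by_cases h : key x < key m <;> simp [PySem.List.insertBy, h]

-- head of the stable sort is Python's min (first extremal element)
theorem pv_head?_sorted_eq_min? {α κ : Type} [LT κ] [DecidableLT κ] (xs : List α) (key : α → κ) :
    (PySem.List.sorted xs key false).head? = PySem.List.min? xs key := by
  induction xs using List.reverseRecOn with
  | nil => rfl
  | append_singleton ys x ih =>
      simp only [PySem.List.sorted, PySem.List.min?, List.foldl_append, List.foldl_cons,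
        List.foldl_nil, Bool.false_eq_true, if_false] at *
      rw [pv_head?_insertBy, ih]
      rfl

-- min? commutes with mapping the elements
theorem pv_min?_map {α β κ : Type} [LT κ] [DecidableLT κ] (f : α → β) (k : β → κ) (l : List α) :
    PySem.List.min? (l.map f) k = (PySem.List.min? l (fun a => k (f a))).map f := by
  simp only [PySem.List.min?]
  have h : ∀ (acc : Option α),
      List.foldl (fun acc x => match acc with
        | none => some x
        | some m => if k x < k m then some x else some m) (acc.map f) (l.map f) =
      (List.foldl (fun acc x => match acc with
        | none => some x
        | some m => if k (f x) < k (f m) then some x else some m) acc l).map f := by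
    intro acc
    induction l generalizing acc with
    | nil => rfl
    | cons b u ihu =>
        cases acc with
        | none => simpa using ihu (some b)
        | some m =>
            by_cases hb : k (f b) < k (f m)
            · simp only [List.map_cons, List.foldl_cons, Option.map_some, hb, if_true]
              simpa using ihu (some b)
            · simp only [List.map_cons, List.foldl_cons, Option.map_some, hb, if_false]
              simpa using ihu (some m)
  simpa using h none

theorem pv_enumerate_map {α β : Type} (g : α → β) (l : List α) (s : Int) :
    PySem.List.enumerate (l.map g) s = (PySem.List.enumerate l s).map (fun p => (p.1, g p.2)) := by
  induction l generalizing s with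
  | nil => rfl
  | cons a t ih => simp [PySem.List.enumerate_cons, ih]

theorem pv_mem_keys_update {κ ν : Type} [BEq κ] [LawfulBEq κ] (ps : List (κ × ν))
    (d : PySem.Dict κ ν) (k : κ) (h : k ∈ d.keys) : k ∈ (d.update ps).keys := by
  induction ps generalizing d with
  | nil => exact h
  | cons p rest ih =>
      have : k ∈ (d.insert p.1 p.2).keys := (PySem.Dict.mem_keys_insert _ _ _ _).2 (Or.inr h)
      simpa [PySem.Dict.update] using ih (d.insert p.1 p.2) this

theorem pv_keys_ofList_ne_nil {κ ν : Type} [BEq κ] [LawfulBEq κ]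
    (latency : List (κ × ν)) (h : latency ≠ []) : (PySem.Dict.ofList latency).keys ≠ [] := by
  rcases latency with _ | ⟨⟨k, v⟩, rest⟩
  · exact absurd rfl h
  · have hk : k ∈ (PySem.Dict.empty.insert k v).keys := (PySem.Dict.mem_keys_insert _ _ _ _).2 (Or.inl rfl)
    have : k ∈ (PySem.Dict.ofList ((k, v) :: rest)).keys := by
      simpa [PySem.Dict.ofList, PySem.Dict.update] using pv_mem_keys_update rest _ k hk
    exact List.ne_nil_of_mem this

-- per-dict agreement: A's min scan returns some m with m.1 = B's sort-then-head position
theorem pv_step_eq (latency : List (Int × List Int)) (h : latency ≠ []) :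
    ∃ m, PySem.List.min?
        (PySem.List.enumerate
          ((PySem.List.sorted (PySem.Dict.ofList latency).keys (fun k => k) false).map
            (fun neuron => PySem.List.slice ((PySem.Dict.ofList latency).getD neuron []) none (some 1))) 0)
        (fun p => p.2) = some m ∧ m.1 = pvBestNeuron latency := by
  set d := PySem.Dict.ofList latency with hd
  set ks := PySem.List.sorted d.keys (fun k => k) false with hks
  set g := fun neuron => PySem.List.slice (d.getD neuron []) none (some 1) with hg
  have hksne : ks ≠ [] := by
    rw [hks]
    intro hnil
    exact pv_keys_ofList_ne_nil latency h ((PySem.List.sorted_eq_nil_iff _ _ _).1 hnil)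
  rcases hm : PySem.List.min? (PySem.List.enumerate (ks.map g) 0) (fun p => p.2) with _ | m
  · exfalso
    have hnil := (PySem.List.min?_eq_none_iff _ _).1 hm
    rcases hke : ks with _ | ⟨a, t⟩
    · exact hksne hke
    · rw [hke] at hnil
      simp [PySem.List.enumerate_cons] at hnil
  · refine ⟨m, rfl, ?_⟩
    have hB : pvBestNeuron latency =
        (match PySem.List.pyGet? (PySem.List.sorted
            ((PySem.List.enumerate ks 0).map (fun p => (g p.2, p.1))) (fun q => q.1)) 0 with
          | some q => q.2
          | none => (0 : Int)) := rfl
    rw [hB]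
    have hpairs : (PySem.List.enumerate ks 0).map (fun p => (g p.2, p.1)) =
        (PySem.List.enumerate (ks.map g) 0).map (fun p : Int × List Int => (p.2, p.1)) := by
      rw [pv_enumerate_map]
      simp
    rw [hpairs]
    have hs := pv_head?_sorted_eq_min?
      ((PySem.List.enumerate (ks.map g) 0).map (fun p : Int × List Int => (p.2, p.1)))
      (fun q => q.1)
    rw [pv_min?_map (fun p : Int × List Int => (p.2, p.1)) (fun q => q.1)] at hs
    have hkey : (fun a : Int × List Int => ((a.2, a.1).1 : List Int)) = fun a => a.2 := rfl
    rw [hkey, hm] at hs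
    rcases hsl : PySem.List.sorted
        ((PySem.List.enumerate (ks.map g) 0).map (fun p : Int × List Int => (p.2, p.1)))
        (fun q => q.1) false with _ | ⟨q, t⟩
    · rw [hsl] at hs; simp at hs
    · rw [hsl] at hs
      simp at hs
      simp [PySem.List.pyGet?, PySem.List.pyIdx?, hs]

-- ===== VERDICT (by name: the statement is the Claim_ definition above) =====
theorem predict_from_latency_spec : Claim_equal_predict_from_latency := by
  intro latency_list _ hpre
  unfold Spec_predict_from_latency predict_from_latency predict_from_latency_alt
  have main : ∀ (l : List (List (Int × List Int))) (init : List Int),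
      (∀ x ∈ l, x ≠ []) →
      l.foldl (fun output_list latency =>
        let d := PySem.Dict.ofList latency
        let tmp_list := (PySem.List.sorted d.keys (fun k => k) false).map
          (fun neuron => PySem.List.slice (d.getD neuron []) none (some 1))
        match PySem.List.min? (PySem.List.enumerate tmp_list 0) (fun p => p.2) with
        | some m => output_list ++ [m.1]
        | none => output_list) init = init ++ l.map pvBestNeuron := by
    intro l
    induction l with
    | nil => intro init _; simp
    | cons latency rest ih =>
        intro init hl
        obtain ⟨m, hm, hmv⟩ := pv_step_eq latency (hl latency (by simp))
        simp only [List.foldl_cons, List.map_cons, hm]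
        rw [ih (init ++ [m.1]) (fun x hx => hl x (by simp [hx])), hmv]
        simp
  simpa using main latency_list [] hpre
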